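-- pv_equiv track=rewrite | github.com/thynnine/pysic | pysic/utility/convenience.py | expand_symbols_string
-- ===== SOURCE A (Python) =====
-- def expand_symbols_string(symbol_string):
--     """Expands a string of chemical symbols to list.
--
--     The function parses a string of chemical symbols and turns
--     it to a list such as those expected by
--     :class:`~pysic.interactions.local.Potential`.
--
--     Examples::
--
--       >>> print expand_symbols_string("HH")
--       [['H', 'H']]
--       >>> print expand_symbols_string("SiSi,SiO,SiH")
--       [['Si', 'Si'], ['Si', 'O'], ['Si', 'H']]
--
--     Parameters:
--
--     symbol_string: string
--         the string to be expanded
--     """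
--
--     parts = symbol_string.split(',')
--     symbol_list = []
--     for part in parts:
--         newsymbol = ""
--         newset = []
--         for letter in part:
--             if letter.isupper():
--                 if newsymbol != "":
--                     newset.append(newsymbol)
--                 newsymbol = letter
--             else:
--                 newsymbol += letter
--         newset.append(newsymbol)
--         symbol_list.append(newset)
--
--     return symbol_list
-- ===== SOURCE B (Python) =====
-- def expand_symbols_string(symbol_string):
--     """Boundary-slicing re-implementation: per part, collect split indices then slice."""
--     symbol_list = []
--     for part in symbol_string.split(','):
--         bounds = [0] + [i for i, c in enumerate(part) if i > 0 and c.isupper()]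
--         ends = bounds[1:] + [len(part)]
--         symbol_list.append([part[b:e] for b, e in zip(bounds, ends)])
--     return symbol_list
-- ===== Notes on version B (the rewrite author's own statement) =====
-- stated objective: alternative
-- what changed: Replaces A's character-by-character accumulator scan (building each symbol by string concatenation and flushing on uppercase) with computing, per comma-separated part, the list of uppercase boundary indices and slicing the part between consecutive boundaries.
import Mathlib
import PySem

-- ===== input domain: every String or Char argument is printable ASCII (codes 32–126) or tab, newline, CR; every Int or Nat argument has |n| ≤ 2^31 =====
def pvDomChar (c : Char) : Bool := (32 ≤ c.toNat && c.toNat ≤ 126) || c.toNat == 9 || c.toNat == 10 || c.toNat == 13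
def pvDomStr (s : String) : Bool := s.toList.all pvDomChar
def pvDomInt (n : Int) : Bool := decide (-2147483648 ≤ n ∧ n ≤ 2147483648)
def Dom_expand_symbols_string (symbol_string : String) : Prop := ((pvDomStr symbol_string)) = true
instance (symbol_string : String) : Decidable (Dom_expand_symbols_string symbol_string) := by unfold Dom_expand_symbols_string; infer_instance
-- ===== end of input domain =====

-- B replaces A's character-accumulation scan by computing the list of uppercase
-- boundary indices per part and slicing between consecutive boundaries (objective: alternative).

-- ===== PORT A =====
-- A's inner loop state (newset, newsymbol); strings handled as List Char (PySem convention)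
def pvFoldA (acc : List (List Char) × List Char) (letter : Char) : List (List Char) × List Char :=
  if PySem.Chars.isupper letter then
    ((if acc.2 = [] then acc.1 else acc.1 ++ [acc.2]), [letter])
  else (acc.1, acc.2 ++ [letter])

def pvPartA (part : List Char) : List (List Char) :=
  let st := part.foldl pvFoldA ([], [])
  st.1 ++ [st.2]

def expand_symbols_string (symbol_string : String) : List (List String) :=
  (PySem.Chars.splitOn symbol_string.toList [',']).map
    (fun part => (pvPartA part).map String.ofList)

-- ===== PORT B =====
-- per-part body of Source B: boundary indices, then slices between consecutive boundaries
def pvPartB (part : List Char) : List (List Char) :=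
  let bounds : List Int :=
    0 :: (((PySem.List.enumerate part).filter
            (fun p => decide (0 < p.1) && PySem.Chars.isupper p.2)).map Prod.fst)
  let ends : List Int := bounds.tail ++ [(part.length : Int)]
  (bounds.zip ends).map (fun p => PySem.List.slice part (some p.1) (some p.2))

def expand_symbols_string_alt (symbol_string : String) : List (List String) :=
  (PySem.Chars.splitOn symbol_string.toList [',']).map
    (fun part => (pvPartB part).map String.ofList)

-- ===== PRECONDITION & SPEC =====
def Spec_expand_symbols_string (symbol_string : String) (out : List (List String)) : Prop := out = expand_symbols_string_alt symbol_string
instance (symbol_string : String) (out : List (List String)) : Decidable (Spec_expand_symbols_string symbol_string out) := by unfold Spec_expand_symbols_string; infer_instance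

-- ===== CLAIM (what is proved, stated in full; the proofs are below) =====
def Claim_equal_expand_symbols_string : Prop := ∀ (symbol_string : String), Dom_expand_symbols_string symbol_string → Spec_expand_symbols_string symbol_string (expand_symbols_string symbol_string)

-- ===== LEMMAS AND PROOFS =====

-- (sp cs).1 = run of chars before the first uppercase; (sp cs).2 = the later groups,
-- each starting at an uppercase char
def pvSp : List Char → List Char × List (List Char)
  | [] => ([], [])
  | c :: rest =>
      let p := pvSp rest
      if PySem.Chars.isupper c then ([], (c :: p.1) :: p.2) else (c :: p.1, p.2)

-- the common normal form: groups of a part (index 0 never splits)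
def pvGrp : List Char → List (List Char)
  | [] => [[]]
  | c :: rest => (c :: (pvSp rest).1) :: (pvSp rest).2

-- all uppercase indices of cs
def pvU : List Char → List Nat
  | [] => []
  | c :: rest => (if PySem.Chars.isupper c then [0] else []) ++ (pvU rest).map (· + 1)

-- slices of xs between consecutive boundaries of bs (and last boundary to the end)
def pvNS (xs : List Char) (bs : List Nat) : List (List Char) :=
  (bs.zip (bs.tail ++ [xs.length])).map (fun p => (xs.drop p.1).take (p.2 - p.1))

lemma pvNS_cons0 (xs : List Char) (bs : List Nat) :
    pvNS xs (0 :: bs) = xs.take (bs.headD xs.length) :: pvNS xs bs := by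
  cases bs with
  | nil => simp [pvNS]
  | cons b bs' => simp [pvNS]

lemma pvNS_shift (c : Char) (xs : List Char) (bs : List Nat) :
    pvNS (c :: xs) (bs.map (· + 1)) = pvNS xs bs := by
  unfold pvNS
  have htail : (bs.map (· + 1)).tail ++ [(c :: xs).length] = (bs.tail ++ [xs.length]).map (· + 1) := by
    simp [List.map_tail]
  rw [htail, List.zip_map, List.map_map]
  refine List.map_congr_left ?_
  intro p hp
  simp [Nat.succ_sub_succ]

lemma pvSp_spec (cs : List Char) :
    (pvSp cs).1 = cs.take ((pvU cs).headD cs.length) ∧ (pvSp cs).2 = pvNS cs (pvU cs) := by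
  induction cs with
  | nil => simp [pvSp, pvU, pvNS]
  | cons c rest ih =>
    obtain ⟨ih1, ih2⟩ := ih
    by_cases hc : PySem.Chars.isupper c
    · have h0 : pvU (c :: rest) = 0 :: (pvU rest).map (· + 1) := by simp [pvU, hc]
      constructor
      · rw [h0]; simp [pvSp, hc]
      · rw [h0, pvNS_cons0, pvNS_shift, ← ih2]
        have hfst : (c :: rest).take (((pvU rest).map (· + 1)).headD (c :: rest).length)
            = c :: (pvSp rest).1 := by
          rw [ih1]; cases pvU rest <;> simp
        rw [hfst]; simp [pvSp, hc]
    · have h0 : pvU (c :: rest) = (pvU rest).map (· + 1) := by simp [pvU, hc]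
      constructor
      · rw [h0]
        have hfst : (c :: rest).take (((pvU rest).map (· + 1)).headD (c :: rest).length)
            = c :: (pvSp rest).1 := by
          rw [ih1]; cases pvU rest <;> simp
        rw [hfst]; simp [pvSp, hc]
      · rw [h0, pvNS_shift, ← ih2]; simp [pvSp, hc]

-- A's loop, with nonempty current symbol, produces done ++ (cur-extended first group) :: later groups
lemma pvFoldA_run (cs : List Char) :
    ∀ (done : List (List Char)) (cur : List Char), cur ≠ [] →
      (cs.foldl pvFoldA (done, cur)).1 ++ [(cs.foldl pvFoldA (done, cur)).2]
        = done ++ ((cur ++ (pvSp cs).1) :: (pvSp cs).2) := by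
  induction cs with
  | nil => intro done cur _; simp [pvSp]
  | cons c rest ih =>
    intro done cur hcur
    by_cases hc : PySem.Chars.isupper c
    · have : (c :: rest).foldl pvFoldA (done, cur) = rest.foldl pvFoldA (done ++ [cur], [c]) := by
        simp [pvFoldA, hc, hcur]
      rw [this, ih (done ++ [cur]) [c] (by simp)]
      simp [pvSp, hc]
    · have : (c :: rest).foldl pvFoldA (done, cur) = rest.foldl pvFoldA (done, cur ++ [c]) := by
        simp [pvFoldA, hc]
      rw [this, ih done (cur ++ [c]) (by simp)]
      simp [pvSp, hc]

lemma pvPartA_eq_grp (cs : List Char) : pvPartA cs = pvGrp cs := by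
  cases cs with
  | nil => simp [pvPartA, pvGrp]
  | cons c rest =>
    have hstep : (c :: rest).foldl pvFoldA ([], []) = rest.foldl pvFoldA ([], [c]) := by
      by_cases hc : PySem.Chars.isupper c <;> simp [pvFoldA, hc]
    unfold pvPartA
    rw [hstep, pvFoldA_run rest [] [c] (by simp)]
    simp [pvGrp]

-- uppercase indices strictly after position 0
def pvTailU : List Char → List Nat
  | [] => []
  | _ :: rest => (pvU rest).map (· + 1)

-- enumerate-filter from a start offset ≥ 1 yields all uppercase indices, shifted by the offset
lemma pvEnum_filter (cs : List Char) : ∀ (t : Int), 1 ≤ t →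
    ((PySem.List.enumerate cs t).filter
        (fun p => decide (0 < p.1) && PySem.Chars.isupper p.2)).map Prod.fst
      = (pvU cs).map (fun n => Int.ofNat n + t) := by
  induction cs with
  | nil => intro t _; simp [PySem.List.enumerate_nil, pvU]
  | cons c rest ih =>
    intro t ht
    have hpos : (0 : Int) < t := by omega
    rw [PySem.List.enumerate_cons, List.filter_cons]
    have hcond : (decide (0 < ((t, c) : Int × Char).1) && PySem.Chars.isupper ((t, c) : Int × Char).2)
        = PySem.Chars.isupper c := by simp [hpos]
    rw [hcond]
    by_cases hc : PySem.Chars.isupper c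
    · rw [if_pos hc, List.map_cons, ih (t + 1) (by omega),
        show pvU (c :: rest) = 0 :: (pvU rest).map (· + 1) from by simp [pvU, hc],
        List.map_cons, List.map_map]
      congr 1
      · simp [Int.ofNat_eq_natCast]
      · refine List.map_congr_left ?_
        intro n _
        simp [Function.comp, Int.ofNat_eq_natCast]; ring
    · rw [if_neg hc, ih (t + 1) (by omega),
        show pvU (c :: rest) = (pvU rest).map (· + 1) from by simp [pvU, hc],
        List.map_map]
      refine List.map_congr_left ?_
      intro n _
      simp [Function.comp, Int.ofNat_eq_natCast]; ring

-- the Int-index slice computation equals the Nat-index pvNS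
lemma pvNS_cast (xs : List Char) (bs : List Nat) :
    ((bs.map Int.ofNat).zip ((bs.map Int.ofNat).tail ++ [(xs.length : Int)])).map
        (fun p => PySem.List.slice xs (some p.1) (some p.2))
      = pvNS xs bs := by
  have htail : (bs.map Int.ofNat).tail ++ [(xs.length : Int)]
      = (bs.tail ++ [xs.length]).map Int.ofNat := by
    rw [← List.map_tail, List.map_append]
    simp [Int.ofNat_eq_natCast]
  rw [htail, List.zip_map, List.map_map]
  refine List.map_congr_left ?_
  intro p _
  cases p with
  | mk a b => simp [Prod.map, Int.ofNat_eq_natCast, PySem.List.slice_natCast]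

lemma pvPartB_eq_NS (cs : List Char) : pvPartB cs = pvNS cs (0 :: pvTailU cs) := by
  have hbounds : ((PySem.List.enumerate cs 0).filter
        (fun p => decide (0 < p.1) && PySem.Chars.isupper p.2)).map Prod.fst
      = (pvTailU cs).map Int.ofNat := by
    cases cs with
    | nil => simp [PySem.List.enumerate_nil, pvTailU]
    | cons c rest =>
      rw [PySem.List.enumerate_cons, List.filter_cons]
      have hcond : (decide (0 < ((0, c) : Int × Char).1) && PySem.Chars.isupper ((0, c) : Int × Char).2)
          = false := by simp
      rw [hcond, if_neg (by simp), show ((0 : Int) + 1) = 1 from by norm_num,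
        pvEnum_filter rest 1 (by omega)]
      simp only [pvTailU, List.map_map]
      refine List.map_congr_left ?_
      intro n _
      simp [Function.comp, Int.ofNat_eq_natCast]
  have hcons : (0 : Int) :: (pvTailU cs).map Int.ofNat
      = ((0 :: pvTailU cs).map Int.ofNat) := by
    simp [Int.ofNat_eq_natCast]
  unfold pvPartB
  rw [hbounds]
  rw [hcons, ← pvNS_cast cs (0 :: pvTailU cs)]

lemma pvPartB_eq_grp (cs : List Char) : pvPartB cs = pvGrp cs := by
  rw [pvPartB_eq_NS]
  cases cs with
  | nil => simp [pvTailU, pvNS, pvGrp]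
  | cons c rest =>
    obtain ⟨h1, h2⟩ := pvSp_spec rest
    rw [pvNS_cons0]
    simp only [pvTailU, pvNS_shift, pvGrp, ← h2]
    have hfst : (c :: rest).take (((pvU rest).map (· + 1)).headD (c :: rest).length)
        = c :: (pvSp rest).1 := by
      rw [h1]; cases pvU rest <;> simp
    rw [hfst]

-- ===== VERDICT (by name: the statement is the Claim_ definition above) =====
theorem expand_symbols_string_spec : Claim_equal_expand_symbols_string := by
  intro s _
  unfold Spec_expand_symbols_string expand_symbols_string expand_symbols_string_alt
  refine List.map_congr_left ?_
  intro part _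
  rw [pvPartA_eq_grp, pvPartB_eq_grp]
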